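-- pv_equiv track=rewrite | github.com/dhamilton47/advent_of_code_2019 | src/Day 8 - Space Image Format.py | transform_program
-- ===== SOURCE A (Python) =====
-- def transform_program(contents, count, length):
--     layers_index = [0]
--     for i in range(count):
--         layers_index.append(layers_index[-1] + length)
--
--     image_layers = []
--     for i in range(count):
--         image_layers.extend([contents[layers_index[i]:layers_index[i + 1]]])
--
--     return image_layers
-- ===== SOURCE B (Python) =====
-- def transform_program(contents, count, length):
--     image_layers = []
--     rest = contents
--     n = count
--     while n > 0:
--         image_layers.append(rest[:length])
--         rest = rest[length:]
--         n -= 1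
--     return image_layers
-- ===== Notes on version B (the rewrite author's own statement) =====
-- stated objective: alternative
-- what changed: B drops A's layers_index offset table and all index arithmetic: it repeatedly peels the first `length` elements off a shrinking remainder list (rest[:length], rest = rest[length:]), so the loop state is the suffix of the data itself rather than positions into it.
import Mathlib
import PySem

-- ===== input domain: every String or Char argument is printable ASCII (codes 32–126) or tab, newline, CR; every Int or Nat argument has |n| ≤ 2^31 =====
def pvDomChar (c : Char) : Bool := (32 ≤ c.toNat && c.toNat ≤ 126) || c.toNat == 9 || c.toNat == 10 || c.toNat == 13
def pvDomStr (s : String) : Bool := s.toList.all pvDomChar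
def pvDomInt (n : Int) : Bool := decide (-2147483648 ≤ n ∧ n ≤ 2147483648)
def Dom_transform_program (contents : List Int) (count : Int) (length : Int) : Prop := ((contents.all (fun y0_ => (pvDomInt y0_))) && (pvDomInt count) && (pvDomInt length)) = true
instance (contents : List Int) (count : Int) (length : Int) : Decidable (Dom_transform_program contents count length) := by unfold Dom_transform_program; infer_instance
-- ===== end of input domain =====

-- B replaces A's offset-table indexing by peeling each layer off a shrinking remainder list (no indices at all).

-- ===== PORT A =====
def transform_program (contents : List Int) (count : Int) (length : Int) : List (List Int) :=
  let layers_index : List Int :=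
    (PySem.List.pyRange 0 count 1).foldl
      (fun li _ => li ++ [PySem.List.pyGetD li (-1) 0 + length]) [0]
  (PySem.List.pyRange 0 count 1).foldl
    (fun acc i =>
      acc ++ [PySem.List.slice contents (some (PySem.List.pyGetD layers_index i 0))
                                        (some (PySem.List.pyGetD layers_index (i + 1) 0))])
    []

-- ===== PORT B =====
-- while n > 0: append rest[:length]; rest = rest[length:]; n -= 1   (iterations = count.toNat)
def tpLoop (length : Int) : Nat → List Int → List (List Int) → List (List Int)
  | 0, _, acc => acc
  | n + 1, rest, acc =>
      tpLoop length n (PySem.List.slice rest (some length) none)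
        (acc ++ [PySem.List.slice rest none (some length)])

def transform_program_alt (contents : List Int) (count : Int) (length : Int) : List (List Int) :=
  tpLoop length count.toNat contents []

-- ===== PRECONDITION & SPEC =====
def Spec_transform_program (contents : List Int) (count : Int) (length : Int) (out : List (List Int)) : Prop := out = transform_program_alt contents count length
instance (contents : List Int) (count : Int) (length : Int) (out : List (List Int)) : Decidable (Spec_transform_program contents count length out) := by unfold Spec_transform_program; infer_instance

-- ===== CLAIM (what is proved, stated in full; the proofs are below) =====
def Claim_equal_transform_program : Prop := ∀ (contents : List Int) (count : Int) (length : Int), Dom_transform_program contents count length → Spec_transform_program contents count length (transform_program contents count length)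

-- ===== LEMMAS AND PROOFS =====

-- A's index table is [0, length, 2*length, …, n*length]
theorem pv_liA (length : Int) (n : Nat) :
    (List.range n).foldl (fun li _ => li ++ [PySem.List.pyGetD li (-1) 0 + length]) [(0 : Int)]
      = (List.range (n + 1)).map (fun (k : Nat) => (k : Int) * length) := by
  induction n with
  | zero => simp
  | succ n ih =>
    rw [List.range_succ, List.foldl_append, ih, List.foldl_cons, List.foldl_nil]
    conv_rhs => rw [List.range_succ]
    rw [List.map_append, List.range_succ, List.map_append]
    simp only [List.map_cons, List.map_nil, PySem.List.pyGetD_neg_one_append_singleton]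
    have h : (n : Int) * length + length = ((n + 1 : Nat) : Int) * length := by push_cast; ring
    rw [h]

-- chunk k of the remainder rest[L:] is chunk k+1 of rest (holds for every L, incl. L ≤ 0)
theorem pv_chunk_shift (xs : List Int) (L : Int) (k : Nat) :
    PySem.List.slice (PySem.List.slice xs (some L) none)
      (some ((k : Int) * L)) (some (((k : Int) + 1) * L))
      = PySem.List.slice xs (some (((k : Int) + 1) * L)) (some (((k : Int) + 2) * L)) := by
  by_cases hL : 0 ≤ L
  · obtain ⟨l, rfl⟩ : ∃ l : Nat, L = (l : Int) := ⟨L.toNat, (Int.toNat_of_nonneg hL).symm⟩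
    have e1 : (k : Int) * l = ((k * l : Nat) : Int) := by push_cast; ring
    have e2 : ((k : Int) + 1) * l = (((k + 1) * l : Nat) : Int) := by push_cast; ring
    have e3 : ((k : Int) + 2) * l = (((k + 2) * l : Nat) : Int) := by push_cast; ring
    rw [e1, e2, e3, PySem.List.slice_from_natCast, PySem.List.slice_natCast,
        PySem.List.slice_natCast, List.drop_drop]
    have t1 : (k + 1) * l = k * l + l := by ring
    have t2 : (k + 2) * l = (k * l + l) + l := by ring
    rw [t1, t2, Nat.add_comm l (k * l)]
    simp
  · obtain ⟨m, hm, rfl⟩ : ∃ m : Nat, 0 < m ∧ L = -(m : Int) :=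
      ⟨(-L).toNat, by omega, by omega⟩
    have len0 : ∀ (ys : List Int) (a b : Nat), 0 < a → a ≤ b →
        PySem.List.slice ys (some (-(a : Int))) (some (-(b : Int))) = [] := by
      intro ys a b ha hab
      have h : (PySem.List.slice ys (some (-(a : Int))) (some (-(b : Int)))).length = 0 := by
        rw [PySem.List.length_slice, PySem.List.clampIdx_neg_natCast _ _ ha,
            PySem.List.clampIdx_neg_natCast _ _ (by omega : 0 < b)]
        omega
      exact List.length_eq_zero_iff.mp h
    have hys : PySem.List.slice xs (some (-(m : Int))) none = xs.drop (xs.length - m) :=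
      PySem.List.slice_from_neg_natCast xs m hm
    have eR : ((k : Int) + 1) * -(m : Int) = -(((k + 1) * m : Nat) : Int) := by push_cast; ring
    have eR2 : ((k : Int) + 2) * -(m : Int) = -(((k + 2) * m : Nat) : Int) := by push_cast; ring
    rw [eR, eR2, hys, len0 xs ((k+1)*m) ((k+2)*m) (by positivity) (by nlinarith)]
    rcases k with _ | k
    · have hm1 : ((0 : Nat) + 1) * m = m := by omega
      rw [show ((0 : ℕ) : Int) * -(m : Int) = (0 : Int) by push_cast; ring,
          PySem.List.slice_zero_start, hm1,
          PySem.List.slice_to_neg_natCast _ _ hm]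
      have ht : (List.drop (xs.length - m) xs).length - m = 0 := by simp; omega
      rw [ht, List.take_zero]
    · have e1 : (((k + 1 : Nat)) : Int) * -(m : Int) = -(((k + 1) * m : Nat) : Int) := by
        push_cast; ring
      rw [e1, len0 _ ((k+1)*m) ((k+1+1)*m) (by positivity) (by nlinarith)]

-- B's loop, characterised as the chunk slices of the current remainder
theorem pv_tpLoop (L : Int) (n : Nat) (rest : List Int) (acc : List (List Int)) :
    tpLoop L n rest acc
      = acc ++ (List.range n).map
          (fun (k : Nat) => PySem.List.slice rest (some ((k : Int) * L)) (some (((k : Int) + 1) * L))) := by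
  induction n generalizing rest acc with
  | zero => simp [tpLoop]
  | succ n ih =>
    rw [tpLoop, ih, List.append_assoc, List.singleton_append]
    congr 1
    rw [List.range_succ_eq_map, List.map_cons, List.map_map]
    congr 1
    · rw [show ((0 : ℕ) : Int) * L = (0 : Int) by push_cast; ring,
          PySem.List.slice_zero_start,
          show (((0 : ℕ) : Int) + 1) * L = L by push_cast; ring]
    · apply List.map_congr_left
      intro k _
      simp only [Function.comp_apply]
      rw [pv_chunk_shift]
      congr 2

theorem pv_eq (contents : List Int) (count : Int) (length : Int) :
    transform_program contents count length = transform_program_alt contents count length := by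
  unfold transform_program transform_program_alt
  rw [PySem.List.pyRange_one, pv_tpLoop]
  simp only [List.foldl_map, pv_liA, sub_zero, zero_add, List.nil_append]
  rw [PySem.List.foldl_append_singleton_eq_map]
  apply List.map_congr_left
  intro k hk
  rw [List.mem_range] at hk
  have h1 : PySem.List.pyGetD ((List.range (count.toNat + 1)).map (fun (j : Nat) => (j : Int) * length)) ((k : Int)) 0 = (k : Int) * length := by
    rw [PySem.List.pyGetD_natCast, List.getD_eq_getElem?_getD, List.getElem?_map,
        List.getElem?_range (by omega)]
    simp
  have h2 : PySem.List.pyGetD ((List.range (count.toNat + 1)).map (fun (j : Nat) => (j : Int) * length)) ((k : Int) + 1) 0 = ((k : Int) + 1) * length := by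
    have hc : ((k : Int) + 1) = ((k + 1 : Nat) : Int) := by push_cast; ring
    rw [hc, PySem.List.pyGetD_natCast, List.getD_eq_getElem?_getD, List.getElem?_map,
        List.getElem?_range (by omega)]
    push_cast; simp
  rw [h1, h2]

-- ===== VERDICT (by name: the statement is the Claim_ definition above) =====
theorem transform_program_spec : Claim_equal_transform_program := by
  intro contents count length _
  exact pv_eq contents count length
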